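-- pv_equiv track=rewrite | github.com/tricksal/brickbase | patterns/ai-agents/autonomous-loops/core.py | _creative_directions
-- ===== SOURCE A (Python) =====
-- def _creative_directions(n: int) -> list[str]:
--     """
--     In production, ask an LLM to generate N distinct creative directions.
--     Here: simple placeholders.
--     """
--     base = [
--         "minimalist, focus on clarity",
--         "comprehensive, cover all edge cases",
--         "performance-optimized, benchmark everything",
--         "developer-experience focused, great error messages",
--         "security-hardened, threat-model driven",
--     ]
--     return [base[i % len(base)] for i in range(n)]
-- ===== SOURCE B (Python) =====
-- def _creative_directions(n: int) -> list[str]: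
--     """
--     In production, ask an LLM to generate N distinct creative directions.
--     Here: simple placeholders.
--     """
--     base = [
--         "minimalist, focus on clarity",
--         "comprehensive, cover all edge cases",
--         "performance-optimized, benchmark everything",
--         "developer-experience focused, great error messages",
--         "security-hardened, threat-model driven",
--     ]
--     return (base * (n // len(base) + 1))[:n]
-- ===== Notes on version B (the rewrite author's own statement) =====
-- stated objective: idiomatic
-- what changed: Replaces the per-element modulo comprehension with bulk list replication (base * (n//len(base)+1)) followed by a [:n] slice.
import Mathlib
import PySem

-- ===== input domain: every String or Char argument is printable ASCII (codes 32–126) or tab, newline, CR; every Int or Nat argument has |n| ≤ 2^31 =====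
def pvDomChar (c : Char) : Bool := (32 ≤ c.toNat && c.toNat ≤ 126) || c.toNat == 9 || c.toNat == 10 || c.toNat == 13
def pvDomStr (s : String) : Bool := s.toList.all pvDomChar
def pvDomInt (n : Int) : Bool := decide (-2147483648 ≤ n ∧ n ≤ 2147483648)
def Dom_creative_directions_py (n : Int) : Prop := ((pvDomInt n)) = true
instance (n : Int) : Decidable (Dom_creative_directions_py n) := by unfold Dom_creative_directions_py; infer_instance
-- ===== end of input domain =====

-- B replaces A's per-element modulo comprehension by bulk replication of the base list then a [:n] slice (idiomatic, same O(n) cost).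

-- the placeholder table, shared literal of both programs
def pvBase : List String := [
  "minimalist, focus on clarity",
  "comprehensive, cover all edge cases",
  "performance-optimized, benchmark everything",
  "developer-experience focused, great error messages",
  "security-hardened, threat-model driven"]

-- ===== PORT A =====
-- [base[i % len(base)] for i in range(n)]; the index i % len(base) is always in range, pyGetD's default is never used
def creative_directions_py (n : Int) : List String :=
  (PySem.List.pyRange 0 n 1).map
    (fun i => PySem.List.pyGetD pvBase (PySem.Int.mod i (pvBase.length : Int)) "")

-- ===== PORT B =====
-- (base * (n // len(base) + 1))[:n]; Python's 'list * k' is empty for k ≤ 0, hence '.toNat'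
def creative_directions_py_alt (n : Int) : List String :=
  PySem.List.slice
    (List.flatten (List.replicate (PySem.Int.floordiv n (pvBase.length : Int) + 1).toNat pvBase))
    none (some n)

-- ===== PRECONDITION & SPEC =====
def Spec_creative_directions_py (n : Int) (out : List String) : Prop := out = creative_directions_py_alt n
instance (n : Int) (out : List String) : Decidable (Spec_creative_directions_py n out) := by unfold Spec_creative_directions_py; infer_instance

-- ===== CLAIM (what is proved, stated in full; the proofs are below) =====
def Claim_equal_creative_directions_py : Prop := ∀ (n : Int), Dom_creative_directions_py n → Spec_creative_directions_py n (creative_directions_py n)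

-- ===== LEMMAS AND PROOFS =====

theorem pv_len_flat (k : Nat) :
    (List.flatten (List.replicate k pvBase)).length = k * 5 := by
  induction k with
  | zero => simp
  | succ k ih => simp [List.replicate_succ, pvBase] at ih ⊢; omega

theorem pv_get_flat (k j : Nat) (h : j < k * 5) :
    (List.flatten (List.replicate k pvBase))[j]'(by rw [pv_len_flat]; exact h)
      = pvBase[j % 5]'(by have := Nat.mod_lt j (show 0 < 5 by norm_num); simpa [pvBase] using this) := by
  induction k generalizing j with
  | zero => omega
  | succ k ih =>
    simp only [List.replicate_succ, List.flatten_cons]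
    by_cases hj : j < 5
    · rw [List.getElem_append_left (by simpa [pvBase] using hj)]
      congr 1
      omega
    · have h5 : pvBase.length ≤ j := by simpa [pvBase] using hj
      rw [List.getElem_append_right h5]
      have hrec := ih (j - 5) (by omega)
      have hb : pvBase.length = 5 := by decide
      simp only [hb]
      rw [hrec]
      congr 1
      omega

theorem pv_main (m : Nat) :
    (List.range m).map (fun k => pvBase.getD (k % 5) "")
      = (List.flatten (List.replicate (m / 5 + 1) pvBase)).take m := by
  apply List.ext_getElem
  · rw [List.length_take, List.length_map, List.length_range, pv_len_flat]
    omega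
  · intro j h₁ h₂
    rw [List.getElem_take, List.getElem_map, List.getElem_range]
    have hj : j < m := by simpa using h₁
    have hjk : j < (m / 5 + 1) * 5 := by omega
    rw [pv_get_flat (m / 5 + 1) j hjk]
    rw [List.getD_eq_getElem _ _ (by have := Nat.mod_lt j (show 0 < 5 by norm_num); simpa [pvBase] using this)]

-- ===== VERDICT (by name: the statement is the Claim_ definition above) =====
theorem creative_directions_py_spec : Claim_equal_creative_directions_py := by
  intro n _
  unfold Spec_creative_directions_py creative_directions_py creative_directions_py_alt
  by_cases hn : n < 0
  -- n < 0: both sides are empty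
  · have h0 : (n - 0).toNat = 0 := by omega
    rw [PySem.List.pyRange_one, h0, List.range_zero, List.map_nil, List.map_nil]
    have hb : (pvBase.length : Int) = 5 := by decide
    have h2 : PySem.Int.floordiv n (pvBase.length : Int) < 0 := by
      rw [hb]
      exact (PySem.Int.floordiv_lt_iff_lt_mul (by norm_num)).mpr (by omega)
    have h3 : (PySem.Int.floordiv n (pvBase.length : Int) + 1).toNat = 0 := by omega
    rw [h3]
    simp [PySem.List.slice]
  -- 0 ≤ n: peel the casts, then pv_main
  · obtain ⟨m, rfl⟩ : ∃ m : Nat, n = (m : Int) := ⟨n.toNat, by omega⟩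
    rw [PySem.List.pyRange_one]
    have h1 : ((m : Int) - 0).toNat = m := by omega
    have hb : (pvBase.length : Int) = 5 := by decide
    rw [h1, List.map_map, hb]
    have h2 : PySem.Int.floordiv (m : Int) 5 = ((m / 5 : Nat) : Int) := by
      exact_mod_cast PySem.Int.floordiv_natCast m 5
    have h3 : (((m / 5 : Nat) : Int) + 1).toNat = m / 5 + 1 := by omega
    rw [h2, h3, PySem.List.slice_to_natCast, ← pv_main m]
    apply List.map_congr_left
    intro k _
    simp only [Function.comp_apply, zero_add]
    rw [show PySem.Int.mod ((k : Nat) : Int) 5 = ((k % 5 : Nat) : Int) from by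
      exact_mod_cast PySem.Int.mod_natCast k 5]
    rw [PySem.List.pyGetD_natCast]
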